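-- pv_equiv track=rewrite | github.com/Timur989898/-ryptopals | test42.py | cube_root
-- ===== SOURCE A (Python) =====
-- def cube_root(n):
--     lo = 0
--     hi = n
--
--     while lo < hi:
--         mid = (lo + hi) // 2
--         if mid**3 < n:
--             lo = mid + 1
--         else:
--             hi = mid
--
--     return lo
-- ===== SOURCE B (Python) =====
-- def cube_root(n):
--     # Newton's method for the floor cube root, then round up to the ceiling.
--     if n <= 0:
--         return 0
--     x = 1 << ((n.bit_length() + 2) // 3)   # overestimate: x**3 >= 2**bit_length > n
--     y = (2 * x + n // (x * x)) // 3
--     while y < x: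
--         x = y
--         y = (2 * x + n // (x * x)) // 3
--     if x * x * x < n:
--         x += 1
--     return x
-- ===== Notes on version B (the rewrite author's own statement) =====
-- stated objective: faster
-- what changed: Replaces the binary search over [0, n] with Newton's method for the integer cube root: start from a power-of-two overestimate derived from n's bit length, iterate x = (2*x + n//(x*x))//3 until it stops decreasing (the floor cube root), then add 1 unless n is a perfect cube.
import Mathlib
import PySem

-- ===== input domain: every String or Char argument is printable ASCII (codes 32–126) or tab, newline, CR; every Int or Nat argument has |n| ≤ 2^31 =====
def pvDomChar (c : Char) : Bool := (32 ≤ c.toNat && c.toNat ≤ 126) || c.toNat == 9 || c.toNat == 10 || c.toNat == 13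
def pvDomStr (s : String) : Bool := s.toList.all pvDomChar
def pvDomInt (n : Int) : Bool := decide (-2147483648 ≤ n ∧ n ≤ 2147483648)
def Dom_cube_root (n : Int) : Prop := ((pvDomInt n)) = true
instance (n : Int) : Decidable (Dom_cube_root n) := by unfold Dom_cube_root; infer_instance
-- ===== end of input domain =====

-- B replaces A's binary search by Newton's method (bit-length overestimate, then
-- x ← (2x + n//x²)//3 until stable, then a ceiling adjustment): fewer loop iterations by a different algorithm.

-- ===== PORT A =====
-- while lo < hi: mid = (lo+hi)//2; if mid**3 < n: lo = mid+1 else hi = mid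
def bsLoop (n lo hi : Int) : Int :=
  if lo < hi then
    let mid := PySem.Int.floordiv (lo + hi) 2
    if mid ^ 3 < n then bsLoop n (mid + 1) hi else bsLoop n lo mid
  else lo
termination_by (hi - lo).toNat
decreasing_by
  · have h := PySem.Int.floordiv_two_mid_bounds (lo := lo) (hi := hi) (by omega)
    omega
  · have h := (PySem.Int.floordiv_lt_iff_lt_mul (a := lo + hi) (b := 2) (q := hi) (by norm_num)).2 (by omega)
    omega

def cube_root (n : Int) : Int := bsLoop n 0 n

-- ===== PORT B =====
-- y = (2*x + n // (x*x)) // 3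
def newtonStep (n x : Int) : Int :=
  PySem.Int.floordiv (2 * x + PySem.Int.floordiv n (x * x)) 3

-- termination helper for newtonLoop: the Newton step stays ≥ 1 (cited by the port)
theorem newtonStep_pos (n x : Int) (hn : 1 ≤ n) (hx : 1 ≤ x) : 1 ≤ newtonStep n x := by
  unfold newtonStep
  have hx2 : (0:Int) < x * x := by positivity
  have hq : 0 ≤ PySem.Int.floordiv n (x * x) := by
    rw [PySem.Int.floordiv_eq_ediv_of_pos hx2]
    exact Int.ediv_nonneg (by omega) (by omega)
  rw [PySem.Int.le_floordiv_iff_mul_le (by norm_num)]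
  rcases eq_or_lt_of_le hx with h1 | h2
  · have : PySem.Int.floordiv n (x * x) = n := by
      rw [← h1]
      simpa using PySem.Int.floordiv_eq_ediv_of_pos (a := n) (b := 1) (by norm_num)
    omega
  · omega

-- while y < x: x = y; y = (2*x + n//(x*x))//3   (run as: step, test, recurse)
def newtonLoop (n x : Int) (hn : 1 ≤ n) (hx : 1 ≤ x) : Int :=
  let y := newtonStep n x
  if _h : y < x then newtonLoop n y hn (newtonStep_pos n x hn hx) else x
termination_by x.toNat
decreasing_by
  have := newtonStep_pos n x hn hx
  omega

def cube_root_alt (n : Int) : Int :=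
  if h : n ≤ 0 then 0
  else
    let x := newtonLoop n ((2 : Int) ^ ((PySem.Int.bitLength n + 2) / 3))
      (by omega)
      (by have : (0:Int) < 2 ^ ((PySem.Int.bitLength n + 2) / 3) := by positivity
          omega)
    if x * x * x < n then x + 1 else x

-- ===== PRECONDITION & SPEC =====
def Spec_cube_root (n : Int) (out : Int) : Prop := out = cube_root_alt n
instance (n : Int) (out : Int) : Decidable (Spec_cube_root n out) := by unfold Spec_cube_root; infer_instance

-- ===== CLAIM (what is proved, stated in full; the proofs are below) =====
def Claim_equal_cube_root : Prop := ∀ (n : Int), Dom_cube_root n → Spec_cube_root n (cube_root n)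

-- ===== LEMMAS AND PROOFS =====

theorem cube_le_cube {a b : Int} (h : a ≤ b) : a ^ 3 ≤ b ^ 3 := by
  nlinarith [sq_nonneg (a + b), sq_nonneg (a - b), sq_nonneg a, sq_nonneg b]

theorem cube_lt_cube {a b : Int} (h : a < b) : a ^ 3 < b ^ 3 := by
  nlinarith [sq_nonneg (a + b), sq_nonneg (a - b), sq_nonneg a, sq_nonneg b]

-- binary-search loop characterisation: result r ∈ [lo,hi], n ≤ r³, everything below r cubes below n
theorem bsLoop_spec (n lo hi : Int) :
    lo ≤ hi → n ≤ hi ^ 3 →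
      lo ≤ bsLoop n lo hi ∧ bsLoop n lo hi ≤ hi ∧ n ≤ (bsLoop n lo hi) ^ 3 ∧
        ∀ m, lo ≤ m → m < bsLoop n lo hi → m ^ 3 < n := by
  fun_induction bsLoop n lo hi with
  | case1 lo hi hlt mid hmid ih =>
    intro _ hhi
    have hmeq : mid = PySem.Int.floordiv (lo + hi) 2 := rfl
    clear_value mid
    have hb := PySem.Int.floordiv_two_mid_bounds (lo := lo) (hi := hi) (by omega)
    have hlt2 : mid < hi := hmeq ▸ (PySem.Int.floordiv_lt_iff_lt_mul (a := lo + hi) (b := 2) (q := hi) (by norm_num)).2 (by omega)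
    obtain ⟨h1, h2, h3, h4⟩ := ih (Int.add_one_le_iff.mpr hlt2) hhi
    refine ⟨by omega, h2, h3, ?_⟩
    intro m hm1 hm2
    by_cases hc : m ≤ mid
    · exact lt_of_le_of_lt (cube_le_cube hc) hmid
    · exact h4 m (by omega) hm2
  | case2 lo hi hlt mid hmid ih =>
    intro _ _
    have hmeq : mid = PySem.Int.floordiv (lo + hi) 2 := rfl
    clear_value mid
    have hb := PySem.Int.floordiv_two_mid_bounds (lo := lo) (hi := hi) (by omega)
    obtain ⟨h1, h2, h3, h4⟩ := ih (by omega) (by omega)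
    exact ⟨by omega, by omega, h3, h4⟩
  | case3 lo hi hlt =>
    intro hle hhi
    have : lo = hi := by omega
    subst this
    exact ⟨le_refl _, le_refl _, hhi, by omega⟩

-- the Newton step never drops below any m with m³ ≤ n
theorem newtonStep_ge (n x m : Int) (hn : 1 ≤ n) (hx : 1 ≤ x) (hm : 0 ≤ m)
    (h : m ^ 3 ≤ n) : m ≤ newtonStep n x := by
  unfold newtonStep
  have hx2 : (0:Int) < x * x := by positivity
  rw [PySem.Int.le_floordiv_iff_mul_le (by norm_num),
      PySem.Int.floordiv_eq_ediv_of_pos hx2]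
  set q := n / (x * x) with hqdef
  have hdm : x * x * q + n % (x * x) = n := Int.ediv_add_emod n (x * x)
  have hr0 : 0 ≤ n % (x * x) := Int.emod_nonneg n (by omega)
  have hr1 : n % (x * x) < x * x := Int.emod_lt_of_pos n hx2
  by_contra hcon
  push_neg at hcon
  have hq : q ≤ 3 * m - 2 * x - 1 := by omega
  have hkey : 3 * m * (x * x) ≤ 2 * x ^ 3 + m ^ 3 := by
    nlinarith [mul_nonneg (sq_nonneg (x - m)) (by omega : (0:Int) ≤ 2 * x + m)]
  nlinarith

theorem newtonLoop_spec (n x : Int) (hn : 1 ≤ n) (hx : 1 ≤ x) :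
    n < (x + 1) ^ 3 →
      1 ≤ newtonLoop n x hn hx ∧ (newtonLoop n x hn hx) ^ 3 ≤ n ∧
        n < (newtonLoop n x hn hx + 1) ^ 3 := by
  fun_induction newtonLoop n x hn hx with
  | case1 x hx y hlt ih =>
    intro _
    apply ih
    by_contra hcon
    push_neg at hcon
    have h1 := newtonStep_ge n x (y + 1) hn hx
      (by have := newtonStep_pos n x hn hx; omega) hcon
    have hyeq : y = newtonStep n x := rfl
    omega
  | case2 x hx y hge =>
    intro hinv
    have hyeq : y = newtonStep n x := rfl
    push_neg at hge
    refine ⟨hx, ?_, hinv⟩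
    by_contra hcon
    push_neg at hcon
    have hx2 : (0:Int) < x * x := by positivity
    have hy : y < x := by
      rw [hyeq]
      unfold newtonStep
      rw [PySem.Int.floordiv_lt_iff_lt_mul (by norm_num : (0:Int) < 3)]
      have hfl : PySem.Int.floordiv n (x * x) < x := by
        rw [PySem.Int.floordiv_lt_iff_lt_mul hx2]
        nlinarith
      omega
    omega

-- n < x0³ for the bit-length based initial overestimate
theorem init_big (n : Int) (hn : 1 ≤ n) :
    n < ((2 : Int) ^ ((PySem.Int.bitLength n + 2) / 3)) ^ 3 := by
  set b := PySem.Int.bitLength n with hb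
  have h1 : n.natAbs < 2 ^ b := PySem.Int.lt_two_pow_bitLength n
  have h2 : b ≤ (b + 2) / 3 * 3 := by omega
  have h3 : (2 : Nat) ^ b ≤ 2 ^ ((b + 2) / 3 * 3) := Nat.pow_le_pow_right (by norm_num) h2
  have h4 : n.natAbs < 2 ^ ((b + 2) / 3 * 3) := lt_of_lt_of_le h1 h3
  have h5 : n = (n.natAbs : Int) := by omega
  calc n = (n.natAbs : Int) := h5
    _ < ((2 : Nat) ^ ((b + 2) / 3 * 3) : Nat) := by exact_mod_cast h4
    _ = ((2 : Int) ^ ((b + 2) / 3)) ^ 3 := by push_cast [pow_mul]; ring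

-- ===== VERDICT (by name: the statement is the Claim_ definition above) =====
theorem cube_root_spec : Claim_equal_cube_root := by
  intro n _
  unfold Spec_cube_root cube_root cube_root_alt
  by_cases hn : n ≤ 0
  · rw [bsLoop]
    simp [hn]
  · simp only [hn, dite_false]
    push_neg at hn
    have hn1 : (1:Int) ≤ n := by omega
    have hcube : n ≤ n ^ 3 := by
      nlinarith [mul_nonneg (mul_nonneg (by omega : (0:Int) ≤ n) (by omega : (0:Int) ≤ n - 1)) (by omega : (0:Int) ≤ n + 1)]
    obtain ⟨ha1, ha2, ha3, ha4⟩ := bsLoop_spec n 0 n (by omega) hcube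
    set rA := bsLoop n 0 n with hrA
    have hx0pos : (0:Int) < 2 ^ ((PySem.Int.bitLength n + 2) / 3) := by positivity
    have hinit : n < ((2 : Int) ^ ((PySem.Int.bitLength n + 2) / 3) + 1) ^ 3 := by
      have hbig := init_big n hn1
      have hmono := cube_le_cube (a := (2 : Int) ^ ((PySem.Int.bitLength n + 2) / 3))
        (b := (2 : Int) ^ ((PySem.Int.bitLength n + 2) / 3) + 1) (by omega)
      linarith
    obtain ⟨hb1, hb2, hb3⟩ := newtonLoop_spec n _ (by omega) _ hinit
    set rB := newtonLoop n ((2 : Int) ^ ((PySem.Int.bitLength n + 2) / 3)) _ _ with hrB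
    have hrB3 : rB * rB * rB = rB ^ 3 := by ring
    by_cases hc : rB * rB * rB < n
    · simp only [hc, if_true]
      have hub : rA ≤ rB + 1 := by
        by_contra hcon
        push_neg at hcon
        have := ha4 (rB + 1) (by omega) (by omega)
        omega
      have hlb : rB + 1 ≤ rA := by
        by_contra hcon
        push_neg at hcon
        have : rA ≤ rB := by omega
        have := cube_le_cube this
        omega
      omega
    · simp only [hc, if_false]
      push_neg at hc
      have heq : rB ^ 3 = n := by omega
      have hub : rA ≤ rB := by
        by_contra hcon
        push_neg at hcon
        have := ha4 rB (by omega) hcon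
        omega
      have hlb : rB ≤ rA := by
        by_contra hcon
        push_neg at hcon
        have := cube_lt_cube hcon
        omega
      omega
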